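-- pv_equiv track=rewrite | github.com/khuushichand/aiml-project | tldw_Server_API/app/core/AuthNZ/input_validation.py | _has_confusing_characters
-- ===== SOURCE A (Python) =====
-- def _has_confusing_characters(username: str) -> bool:
--     """
--     Check for visually confusing character combinations
--
--     Args:
--         username: Username to check
--
--     Returns:
--         True if confusing characters detected
--     """
--     # Confusing pairs that could be used for impersonation
--     confusing_sets = [
--         {'l', '1', 'I', '|'},  # Lowercase L, one, uppercase i, pipe
--         {'O', '0', 'o'},  # Letters O and zero
--         {'S', '5', '$'},  # S, five, dollar
--         {'Z', '2'},  # Z and two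
--         {'B', '8'},  # B and eight
--         {'G', '6'},  # G and six
--     ]
--
--     username_chars = set(username)
--
--     for confusing_set in confusing_sets:
--         # If username contains multiple characters from a confusing set
--         if len(username_chars.intersection(confusing_set)) > 1:
--             return True
--
--     return False
-- ===== SOURCE B (Python) =====
-- def _group(ch):
--     """Group index of a confusing character, or None."""
--     if ch in "l1I|":
--         return 0
--     if ch in "O0o":
--         return 1
--     if ch in "S5$":
--         return 2
--     if ch in "Z2":
--         return 3
--     if ch in "B8":
--         return 4
--     if ch in "G6":
--         return 5
--     return None
--
--
-- def _has_confusing_characters(username: str) -> bool: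
--     # Single pass: remember the first confusing char seen per group;
--     # a second *distinct* char of the same group triggers True.
--     first = [None] * 6
--     for ch in username:
--         g = _group(ch)
--         if g is None:
--             continue
--         if first[g] is None:
--             first[g] = ch
--         elif first[g] != ch:
--             return True
--     return False
-- ===== Notes on version B (the rewrite author's own statement) =====
-- stated objective: alternative
-- what changed: Replaces build-a-char-set-then-six-set-intersections with a single early-exiting pass over the string that records the first confusing character seen per group and returns True on a second distinct one.
import Mathlib
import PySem

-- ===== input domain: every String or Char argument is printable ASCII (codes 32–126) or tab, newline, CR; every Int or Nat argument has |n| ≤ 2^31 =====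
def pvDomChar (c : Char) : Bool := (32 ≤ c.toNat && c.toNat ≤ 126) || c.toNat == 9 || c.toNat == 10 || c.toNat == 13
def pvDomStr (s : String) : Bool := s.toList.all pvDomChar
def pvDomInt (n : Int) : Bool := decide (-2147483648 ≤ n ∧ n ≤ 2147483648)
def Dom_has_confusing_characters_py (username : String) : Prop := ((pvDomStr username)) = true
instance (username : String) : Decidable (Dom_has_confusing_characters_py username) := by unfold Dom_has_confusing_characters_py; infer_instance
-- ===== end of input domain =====

-- B replaces A's build-a-char-set-then-six-set-intersections with a single early-exiting
-- pass over the string that records the first confusing character seen per group (objective: alternative).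

-- ===== PORT A =====
-- the six confusing sets, as Python set literals (PySem.Set of their distinct elements)
def pvConfusingSets : List (List Char) :=
  [PySem.Set.ofList ['l', '1', 'I', '|'],
   PySem.Set.ofList ['O', '0', 'o'],
   PySem.Set.ofList ['S', '5', '$'],
   PySem.Set.ofList ['Z', '2'],
   PySem.Set.ofList ['B', '8'],
   PySem.Set.ofList ['G', '6']]

-- the 'for confusing_set in confusing_sets: if … return True' loop, early return and all
def pvLoopA : List (List Char) → PySem.Set Char → Bool
  | [], _ => false
  | s :: rest, uc =>
      if 1 < (PySem.Set.inter uc s).length then true else pvLoopA rest uc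

def has_confusing_characters_py (username : String) : Bool :=
  pvLoopA pvConfusingSets (PySem.Set.ofList username.toList)

-- ===== PORT B =====
-- _group(ch): the if-chain of 'ch in "…"' tests (exact: 'ch in s' for a single char is list membership)
def pvGroup (c : Char) : Option Nat :=
  if c ∈ ['l', '1', 'I', '|'] then some 0
  else if c ∈ ['O', '0', 'o'] then some 1
  else if c ∈ ['S', '5', '$'] then some 2
  else if c ∈ ['Z', '2'] then some 3
  else if c ∈ ['B', '8'] then some 4
  else if c ∈ ['G', '6'] then some 5
  else none

-- the single pass: 'first' is the list of first-seen chars per group ([None]*6)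
def pvLoopB : List Char → List (Option Char) → Bool
  | [], _ => false
  | c :: rest, first =>
      match pvGroup c with
      | none => pvLoopB rest first
      | some g =>
          match PySem.List.pyGetD first (g : Int) none with
          | none => pvLoopB rest (PySem.List.pySetD first (g : Int) (some c))
          | some d => if d ≠ c then true else pvLoopB rest first

def has_confusing_characters_py_alt (username : String) : Bool :=
  pvLoopB username.toList (List.replicate 6 none)

-- ===== PRECONDITION & SPEC =====
def Spec_has_confusing_characters_py (username : String) (out : Bool) : Prop := out = has_confusing_characters_py_alt username
instance (username : String) (out : Bool) : Decidable (Spec_has_confusing_characters_py username out) := by unfold Spec_has_confusing_characters_py; infer_instance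

-- ===== CLAIM (what is proved, stated in full; the proofs are below) =====
def Claim_equal_has_confusing_characters_py : Prop := ∀ (username : String), Dom_has_confusing_characters_py username → Spec_has_confusing_characters_py username (has_confusing_characters_py username)

-- ===== LEMMAS AND PROOFS =====

-- the raw character list of group g
def pvGroupChars : Nat → List Char
  | 0 => ['l', '1', 'I', '|']
  | 1 => ['O', '0', 'o']
  | 2 => ['S', '5', '$']
  | 3 => ['Z', '2']
  | 4 => ['B', '8']
  | 5 => ['G', '6']
  | _ => []

-- "the string contains two distinct characters of group g"
def pvHit2 (l : List Char) (g : Nat) : Prop :=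
  ∃ a ∈ l, ∃ b ∈ l, pvGroup a = some g ∧ pvGroup b = some g ∧ a ≠ b

lemma pvSets_eq : pvConfusingSets = (List.range 6).map (fun g => PySem.Set.ofList (pvGroupChars g)) := by
  decide

lemma pvGroup_lt {c : Char} {g : Nat} (h : pvGroup c = some g) : g < 6 := by
  unfold pvGroup at h
  split_ifs at h <;> simp_all <;> omega

lemma pvGroup_iff_mem (c : Char) (g : Nat) (hg : g < 6) :
    pvGroup c = some g ↔ c ∈ pvGroupChars g := by
  interval_cases g <;>
  · constructor
    · intro h
      unfold pvGroup at h
      split_ifs at h <;> simp_all [pvGroupChars]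
    · intro h
      fin_cases h <;> rfl

-- A's per-set test, characterised
lemma pvInterLen_iff (chars S : List Char) :
    1 < (PySem.Set.inter (PySem.Set.ofList chars) S).length ↔
      ∃ a ∈ S, ∃ b ∈ S, a ≠ b ∧ a ∈ chars ∧ b ∈ chars := by
  constructor
  · intro hlen
    cases hm : PySem.Set.inter (PySem.Set.ofList chars) S with
    | nil => rw [hm] at hlen; simp at hlen
    | cons a rest1 =>
      cases hm1 : rest1 with
      | nil => rw [hm, hm1] at hlen; simp at hlen
      | cons b rest =>
        subst hm1
        have hnd : (a :: b :: rest).Nodup :=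
          hm ▸ PySem.Set.nodup_inter _ S (PySem.Set.nodup_ofList chars)
        have hne : a ≠ b := by
          rcases List.nodup_cons.mp hnd with ⟨hna, -⟩
          exact fun h => hna (h ▸ List.mem_cons_self)
        have ha : a ∈ PySem.Set.inter (PySem.Set.ofList chars) S := by
          rw [hm]; exact List.mem_cons_self
        have hb : b ∈ PySem.Set.inter (PySem.Set.ofList chars) S := by
          rw [hm]; exact List.mem_cons_of_mem _ (List.mem_cons_self)
        obtain ⟨hac, haS⟩ := (PySem.Set.mem_inter _ _ _).mp ha
        obtain ⟨hbc, hbS⟩ := (PySem.Set.mem_inter _ _ _).mp hb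
        exact ⟨a, haS, b, hbS, hne, (PySem.Set.mem_ofList _ _).mp hac,
          (PySem.Set.mem_ofList _ _).mp hbc⟩
  · rintro ⟨a, haS, b, hbS, hne, hac, hbc⟩
    have ha : a ∈ PySem.Set.inter (PySem.Set.ofList chars) S :=
      (PySem.Set.mem_inter _ _ _).mpr ⟨(PySem.Set.mem_ofList _ _).mpr hac, haS⟩
    have hb : b ∈ PySem.Set.inter (PySem.Set.ofList chars) S :=
      (PySem.Set.mem_inter _ _ _).mpr ⟨(PySem.Set.mem_ofList _ _).mpr hbc, hbS⟩
    have hsub : [a, b] ⊆ PySem.Set.inter (PySem.Set.ofList chars) S := by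
      intro x hx
      rcases List.mem_cons.mp hx with rfl | hx'
      · exact ha
      rcases List.mem_cons.mp hx' with rfl | hx''
      · exact hb
      · simp at hx''
    have hnd2 : ([a, b]).Nodup := by simp [hne]
    have := (hnd2.subperm hsub).length_le
    simp at this
    omega

-- A's loop over an arbitrary list of sets is an existential
lemma pvLoopA_any (sets : List (List Char)) (uc : PySem.Set Char) :
    pvLoopA sets uc = true ↔ ∃ s ∈ sets, 1 < (PySem.Set.inter uc s).length := by
  induction sets with
  | nil => simp [pvLoopA]
  | cons s rest ih =>
    simp only [pvLoopA]
    split_ifs with h <;> simp [h, ih]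

-- A's result, characterised
lemma pvLoopA_iff (chars : List Char) :
    pvLoopA pvConfusingSets (PySem.Set.ofList chars) = true ↔ ∃ g < 6, pvHit2 chars g := by
  rw [pvLoopA_any]
  constructor
  · rintro ⟨s, hs, hlen⟩
    rw [pvSets_eq] at hs
    simp only [List.mem_map, List.mem_range] at hs
    obtain ⟨g, hg6, hseq⟩ := hs
    subst hseq
    rw [pvInterLen_iff] at hlen
    obtain ⟨a, haS, b, hbS, hne, hac, hbc⟩ := hlen
    rw [PySem.Set.mem_ofList] at haS hbS
    exact ⟨g, hg6, a, hac, b, hbc, (pvGroup_iff_mem a g hg6).mpr haS,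
      (pvGroup_iff_mem b g hg6).mpr hbS, hne⟩
  · rintro ⟨g, hg6, a, hac, b, hbc, hga, hgb, hne⟩
    refine ⟨PySem.Set.ofList (pvGroupChars g), ?_, ?_⟩
    · rw [pvSets_eq]
      exact List.mem_map.mpr ⟨g, List.mem_range.mpr hg6, rfl⟩
    · rw [pvInterLen_iff]
      exact ⟨a, (PySem.Set.mem_ofList _ _).mpr ((pvGroup_iff_mem a g hg6).mp hga),
        b, (PySem.Set.mem_ofList _ _).mpr ((pvGroup_iff_mem b g hg6).mp hgb), hne, hac, hbc⟩

-- cons-step facts about B's two kinds of "still to find" conditions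
lemma pvHitNew_cons_ne {c : Char} {rest : List Char} {g : Nat} {d : Char}
    (h : pvGroup c ≠ some g) :
    (∃ x ∈ c :: rest, pvGroup x = some g ∧ x ≠ d) ↔ (∃ x ∈ rest, pvGroup x = some g ∧ x ≠ d) := by
  rw [List.exists_mem_cons_iff]
  constructor
  · rintro (⟨hgc, -⟩ | h2)
    · exact absurd hgc h
    · exact h2
  · exact fun h2 => Or.inr h2

lemma pvHitNew_cons_self {c : Char} {rest : List Char} {g : Nat} :
    (∃ x ∈ c :: rest, pvGroup x = some g ∧ x ≠ c) ↔ (∃ x ∈ rest, pvGroup x = some g ∧ x ≠ c) := by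
  rw [List.exists_mem_cons_iff]
  constructor
  · rintro (⟨-, hcc⟩ | h2)
    · exact absurd rfl hcc
    · exact h2
  · exact fun h2 => Or.inr h2

lemma pvHit2_cons_ne {c : Char} {rest : List Char} {g : Nat} (h : pvGroup c ≠ some g) :
    pvHit2 (c :: rest) g ↔ pvHit2 rest g := by
  unfold pvHit2
  constructor
  · rintro ⟨a, ha, b, hb, hga, hgb, hne⟩
    rcases List.mem_cons.mp ha with rfl | ha'
    · exact absurd hga h
    rcases List.mem_cons.mp hb with rfl | hb'
    · exact absurd hgb h
    exact ⟨a, ha', b, hb', hga, hgb, hne⟩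
  · rintro ⟨a, ha, b, hb, hga, hgb, hne⟩
    exact ⟨a, List.mem_cons_of_mem _ ha, b, List.mem_cons_of_mem _ hb, hga, hgb, hne⟩

lemma pvHit2_cons_group {c : Char} {rest : List Char} {g : Nat} (hc : pvGroup c = some g) :
    pvHit2 (c :: rest) g ↔ (∃ x ∈ rest, pvGroup x = some g ∧ x ≠ c) := by
  unfold pvHit2
  constructor
  · rintro ⟨a, ha, b, hb, hga, hgb, hne⟩
    by_cases hac : a = c
    · subst hac
      have hbc : b ≠ a := Ne.symm hne
      rcases List.mem_cons.mp hb with rfl | hb'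
      · exact absurd rfl hbc
      · exact ⟨b, hb', hgb, hbc⟩
    · rcases List.mem_cons.mp ha with rfl | ha'
      · exact absurd rfl hac
      · exact ⟨a, ha', hga, hac⟩
  · rintro ⟨x, hx, hgx, hxc⟩
    exact ⟨c, List.mem_cons_self, x, List.mem_cons_of_mem _ hx, hc, hgx, Ne.symm hxc⟩

-- B's loop invariant
lemma pvLoopB_iff (l : List Char) (first : List (Option Char)) (h6 : first.length = 6) :
    pvLoopB l first = true ↔
      ∃ g : Nat, g < 6 ∧
        (match PySem.List.pyGetD first (g : Int) none with
         | some d => ∃ c ∈ l, pvGroup c = some g ∧ c ≠ d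
         | none => pvHit2 l g) := by
  induction l generalizing first with
  | nil =>
    constructor
    · intro h; simp [pvLoopB] at h
    · rintro ⟨g, hg, h⟩
      exfalso
      revert h
      cases hfg : PySem.List.pyGetD first (g : Int) none <;> simp [pvHit2]
  | cons c rest ih =>
    simp only [pvLoopB]
    cases hgc : pvGroup c with
    | none =>
      dsimp only
      rw [ih first h6]
      apply exists_congr; intro g
      apply and_congr_right; intro _
      have hne : pvGroup c ≠ some g := by simp [hgc]
      cases hfg : PySem.List.pyGetD first (g : Int) none
      · exact (pvHit2_cons_ne hne).symm
      · exact (pvHitNew_cons_ne hne).symm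
    | some gc =>
      dsimp only
      have hgc6 : gc < 6 := pvGroup_lt hgc
      cases hfg : PySem.List.pyGetD first (gc : Int) none with
      | some d =>
        dsimp only
        by_cases hdc : d = c
        · subst hdc
          rw [if_neg (show ¬ d ≠ d from fun h => h rfl)]
          rw [ih first h6]
          apply exists_congr; intro g
          apply and_congr_right; intro _
          by_cases hggc : g = gc
          · subst hggc
            rw [hfg]
            exact pvHitNew_cons_self.symm
          · have hne : pvGroup d ≠ some g := by
              rw [hgc]; exact fun h => hggc (Option.some.inj h).symm
            cases hfg' : PySem.List.pyGetD first (g : Int) none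
            · exact (pvHit2_cons_ne hne).symm
            · exact (pvHitNew_cons_ne hne).symm
        · rw [if_pos hdc]
          constructor
          · intro _
            refine ⟨gc, hgc6, ?_⟩
            rw [hfg]
            exact ⟨c, List.mem_cons_self, hgc, fun h => hdc h.symm⟩
          · intro _; rfl
      | none =>
        dsimp only
        rw [ih (PySem.List.pySetD first (gc : Int) (some c))
            (by rw [PySem.List.length_pySetD]; exact h6)]
        apply exists_congr; intro g
        apply and_congr_right; intro _
        have hget : PySem.List.pyGetD (PySem.List.pySetD first (gc : Int) (some c)) (g : Int) none
            = if g = gc then some c else PySem.List.pyGetD first (g : Int) none :=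
          PySem.List.pyGetD_pySetD_natCast first gc g (some c) none (by omega)
        by_cases hggc : g = gc
        · subst hggc
          rw [hget, if_pos rfl, hfg]
          exact (pvHit2_cons_group hgc).symm
        · rw [hget, if_neg hggc]
          have hne : pvGroup c ≠ some g := by
            rw [hgc]; exact fun h => hggc (Option.some.inj h).symm
          cases hfg' : PySem.List.pyGetD first (g : Int) none
          · exact (pvHit2_cons_ne hne).symm
          · exact (pvHitNew_cons_ne hne).symm

lemma pvReplicate_get (g : Nat) (hg : g < 6) :
    PySem.List.pyGetD (List.replicate 6 (none : Option Char)) (g : Int) none = none := by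
  interval_cases g <;> rfl

-- ===== VERDICT (by name: the statement is the Claim_ definition above) =====
theorem has_confusing_characters_py_spec : Claim_equal_has_confusing_characters_py := by
  intro username _
  unfold Spec_has_confusing_characters_py has_confusing_characters_py has_confusing_characters_py_alt
  rw [Bool.eq_iff_iff, pvLoopA_iff, pvLoopB_iff _ _ (by simp)]
  constructor
  · rintro ⟨g, hg, h⟩
    refine ⟨g, hg, ?_⟩
    rw [pvReplicate_get g hg]
    exact h
  · rintro ⟨g, hg, h⟩
    rw [pvReplicate_get g hg] at h
    exact ⟨g, hg, h⟩
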